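-- pv_equiv track=rewrite | github.com/bitngu/Data-Structures-Algorithm | Python/Recursion/code.py | findPossibilities
-- ===== SOURCE A (Python) =====
-- def isInRange(val, rightBound):
--     """Check to see if index is out of bound"""
--     return val < rightBound
--
-- def findPossibilities(ls):
--     ls2 = []
--     for i in range(0,len(ls), 2):
--         if isInRange(i+1, len(ls)):
--             if ls[i] == ls[i+1]:
--                 ls2.append(ls[i])
--     if len(ls) % 2 == 1:
--         ls2.append(ls[len(ls)-1])
--     if len(ls2) < 3:
--         return ls2
--     else:
--         return findPossibilities(ls2)
-- ===== SOURCE B (Python) =====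
-- _SENTINEL = object()
--
-- def findPossibilities(ls):
--     # iterative do-while: one pairwise-consuming pass per round, loop until short
--     while True:
--         ls2 = []
--         it = iter(ls)
--         for a in it:
--             b = next(it, _SENTINEL)
--             if b is _SENTINEL:
--                 ls2.append(a)      # odd leftover element
--             elif a == b:
--                 ls2.append(a)
--         if len(ls2) < 3:
--             return ls2
--         ls = ls2
-- ===== Notes on version B (the rewrite author's own statement) =====
-- stated objective: alternative
-- what changed: Replaces A's tail recursion over index-based even-position scans with an explicit do-while loop whose inner pass consumes the list two elements at a time through an iterator, with no index arithmetic or range bookkeeping.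
import Mathlib
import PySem

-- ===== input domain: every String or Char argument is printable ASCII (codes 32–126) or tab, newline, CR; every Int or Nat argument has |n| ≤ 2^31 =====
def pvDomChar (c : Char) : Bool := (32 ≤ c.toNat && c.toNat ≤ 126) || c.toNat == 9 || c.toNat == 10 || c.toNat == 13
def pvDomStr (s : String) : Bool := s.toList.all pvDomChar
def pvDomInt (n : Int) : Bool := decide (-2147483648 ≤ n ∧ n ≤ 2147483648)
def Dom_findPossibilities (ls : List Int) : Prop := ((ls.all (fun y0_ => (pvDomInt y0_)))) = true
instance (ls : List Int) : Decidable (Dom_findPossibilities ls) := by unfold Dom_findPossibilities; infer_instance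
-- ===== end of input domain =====

-- B changes the decomposition: an explicit do-while loop with a pairwise-consuming inner pass
-- replaces A's tail recursion over an index range; same values, same cost (objective: alternative).

-- ===== PORT A =====
-- helpers used only to justify termination of the two ports (the ports cite them in decreasing_by)

-- the pair elements of one pass (structural characterisation, proof/termination helper)
def pvPairs : List Int → List Int
  | a :: b :: rest => (if a = b then [a] else []) ++ pvPairs rest
  | _ => []

-- the leftover trailing element of one pass (proof/termination helper)
def pvTail : List Int → List Int
  | _ :: _ :: rest => pvTail rest
  | rest => rest

theorem pvPairs_tail_len (ls : List Int) :
    (pvPairs ls ++ pvTail ls).length * 2 ≤ ls.length + 1 := by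
  match ls with
  | [] => simp [pvPairs, pvTail]
  | [a] => simp [pvPairs, pvTail]
  | a :: b :: rest =>
    have ih := pvPairs_tail_len rest
    by_cases h : a = b <;> simp [pvPairs, pvTail, h] at * <;> omega

def isInRange (val rightBound : Int) : Bool := decide (val < rightBound)

-- one pass of A: the for-loop over range(0, len(ls), 2) plus the odd-length tail append
def passA (ls : List Int) : List Int :=
  let ls2 := (PySem.List.pyRange 0 (ls.length : Int) 2).foldl
    (fun ls2 i =>
      if isInRange (i + 1) (ls.length : Int) then
        if PySem.List.pyGetD ls i 0 = PySem.List.pyGetD ls (i + 1) 0 then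
          ls2 ++ [PySem.List.pyGetD ls i 0]
        else ls2
      else ls2) []
  if (ls.length : Int) % 2 = 1 then ls2 ++ [PySem.List.pyGetD ls ((ls.length : Int) - 1) 0] else ls2

theorem pvRange2_nil (a b : Int) (h : b ≤ a) : PySem.List.pyRange a b 2 = [] := by
  rw [PySem.List.pyRange_of_pos a b (by norm_num)]
  simp [if_neg (by omega : ¬ a < b)]

theorem pvRange2_cons (a b : Int) (h : a < b) : PySem.List.pyRange a b 2 = a :: PySem.List.pyRange (a + 2) b 2 := by
  rw [PySem.List.pyRange_of_pos a b (by norm_num), PySem.List.pyRange_of_pos (a + 2) b (by norm_num)]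
  rw [if_pos h]
  by_cases h2 : a + 2 < b
  · rw [if_pos h2]
    have hc : (b - a + 2 - 1) / 2 = (b - (a + 2) + 2 - 1) / 2 + 1 := by omega
    have hc' : ((b - a + 2 - 1) / 2).toNat = ((b - (a + 2) + 2 - 1) / 2).toNat + 1 := by omega
    rw [hc', List.range_succ_eq_map]
    simp only [List.map_cons, List.map_map]
    congr 1
    · norm_num
    · refine List.map_congr_left (fun k _ => ?_)
      simp only [Function.comp_apply]
      push_cast
      ring
  · rw [if_neg h2]
    have hc : ((b - a + 2 - 1) / 2).toNat = 1 := by omega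
    rw [hc]
    simp [List.range_one]

-- one pass of A's for-loop over an index range equals pvPairs of the unread suffix
theorem pvFoldA_go (ls pre full acc0 : List Int) (hfull : full = pre ++ ls) :
    (PySem.List.pyRange (pre.length : Int) (full.length : Int) 2).foldl
      (fun ls2 i =>
        if isInRange (i + 1) (full.length : Int) then
          if PySem.List.pyGetD full i 0 = PySem.List.pyGetD full (i + 1) 0 then
            ls2 ++ [PySem.List.pyGetD full i 0]
          else ls2
        else ls2) acc0 = acc0 ++ pvPairs ls := by
  match ls with
  | [] =>
    rw [pvRange2_nil _ _ (by simp [hfull])]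
    simp [pvPairs]
  | [a] =>
    have hl : full.length = pre.length + 1 := by simp [hfull]
    rw [pvRange2_cons _ _ (by rw [hl]; push_cast; omega),
        pvRange2_nil _ _ (by rw [hl]; push_cast; omega)]
    simp only [List.foldl_cons, List.foldl_nil]
    have hc : isInRange ((pre.length : Int) + 1) (full.length : Int) = false := by
      simp [isInRange, hl]
    rw [hc]
    simp [pvPairs]
  | a :: b :: r =>
    have hl : full.length = pre.length + r.length + 2 := by simp [hfull]; omega
    rw [pvRange2_cons _ _ (by rw [hl]; push_cast; omega)]
    simp only [List.foldl_cons]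
    have hc : isInRange ((pre.length : Int) + 1) (full.length : Int) = true := by
      simp [isInRange, hl]
      omega
    have ha : PySem.List.pyGetD full (pre.length : Int) 0 = a := by
      rw [hfull, PySem.List.pyGetD_natCast]
      simp [List.getD_eq_getElem?_getD]
    have hb : PySem.List.pyGetD full ((pre.length : Int) + 1) 0 = b := by
      rw [hfull, show ((pre.length : Int) + 1) = ((pre.length + 1 : Nat) : Int) by push_cast; ring,
          PySem.List.pyGetD_natCast]
      simp [List.getD_eq_getElem?_getD]
    have ih := pvFoldA_go r (pre ++ [a, b]) full
      (if a = b then acc0 ++ [a] else acc0) (by simp [hfull])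
    rw [hc, ha, hb, show ((pre.length : Int) + 2) = (((pre ++ [a, b]).length : Nat) : Int) by simp]
    simp only [if_true]
    rw [ih]
    by_cases h : a = b <;> simp [pvPairs, h]

theorem pvTail_even (ls : List Int) (h : ls.length % 2 = 0) : pvTail ls = [] := by
  match ls with
  | [] => rfl
  | [a] => simp at h
  | a :: b :: rest =>
    simp only [List.length_cons] at h
    exact pvTail_even rest (by omega)

theorem pvTail_odd (ls : List Int) (h : ls.length % 2 = 1) :
    pvTail ls = [ls.getD (ls.length - 1) 0] := by
  match ls with
  | [] => simp at h
  | [a] => rfl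
  | a :: b :: rest =>
    simp only [List.length_cons] at h
    have ih := pvTail_odd rest (by omega)
    obtain ⟨m, hm⟩ : ∃ m, rest.length = m + 1 := ⟨rest.length - 1, by omega⟩
    rw [pvTail, ih]
    have h1 : rest.length - 1 = m := by omega
    have h2 : (a :: b :: rest).length - 1 = m + 1 + 1 := by simp [hm]
    rw [h1, h2, List.getD_cons_succ, List.getD_cons_succ]

theorem passA_eq (ls : List Int) : passA ls = pvPairs ls ++ pvTail ls := by
  unfold passA
  have hfold := pvFoldA_go ls [] ls [] rfl
  simp only [List.length_nil, Nat.cast_zero, List.nil_append] at hfold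
  rw [hfold]
  by_cases h : (ls.length : Int) % 2 = 1
  · rw [if_pos h]
    have hlen : ls.length % 2 = 1 := by omega
    have h1 : ls.length ≠ 0 := by omega
    have hcast : (ls.length : Int) - 1 = ((ls.length - 1 : Nat) : Int) := by omega
    rw [hcast, PySem.List.pyGetD_natCast, pvTail_odd ls hlen]
  · rw [if_neg h]
    have hlen : ls.length % 2 = 0 := by omega
    rw [pvTail_even ls hlen]
    simp

def findPossibilities (ls : List Int) : List Int :=
  let ls2 := passA ls
  if ls2.length < 3 then ls2 else findPossibilities ls2
termination_by ls.length
decreasing_by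
  have h1 := pvPairs_tail_len ls
  have h2 := passA_eq ls
  simp only [ls2, h2] at *
  omega

-- ===== PORT B =====
-- the inner for-loop of B: the iterator yields two elements at a time; a pair appends on
-- equality, a lone leftover element (next returned the sentinel) is appended as is
def passLoop (ls2 rest : List Int) : List Int :=
  match rest with
  | a :: b :: rest' => passLoop (if a = b then ls2 ++ [a] else ls2) rest'
  | [a] => ls2 ++ [a]
  | [] => ls2

theorem passLoop_eq (ls2 rest : List Int) :
    passLoop ls2 rest = ls2 ++ (pvPairs rest ++ pvTail rest) := by
  match rest with
  | [] => simp [passLoop, pvPairs, pvTail]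
  | [a] => simp [passLoop, pvPairs, pvTail]
  | a :: b :: r =>
    have ih := passLoop_eq (if a = b then ls2 ++ [a] else ls2) r
    rw [passLoop, ih]
    by_cases h : a = b <;> simp [h, pvPairs, pvTail]

def findPossibilities_alt (ls : List Int) : List Int :=
  let ls2 := passLoop [] ls
  if ls2.length < 3 then ls2 else findPossibilities_alt ls2
termination_by ls.length
decreasing_by
  have h1 := pvPairs_tail_len ls
  have h2 := passLoop_eq [] ls
  simp only [ls2, h2, List.nil_append] at *
  omega

-- ===== PRECONDITION & SPEC =====
def Spec_findPossibilities (ls : List Int) (out : List Int) : Prop := out = findPossibilities_alt ls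
instance (ls : List Int) (out : List Int) : Decidable (Spec_findPossibilities ls out) := by unfold Spec_findPossibilities; infer_instance

-- ===== CLAIM (what is proved, stated in full; the proofs are below) =====
def Claim_equal_findPossibilities : Prop := ∀ (ls : List Int), Dom_findPossibilities ls → Spec_findPossibilities ls (findPossibilities ls)

-- ===== LEMMAS AND PROOFS =====

theorem pv_main (ls : List Int) : findPossibilities ls = findPossibilities_alt ls := by
  unfold findPossibilities findPossibilities_alt
  have hp : passA ls = passLoop [] ls := by
    rw [passA_eq, passLoop_eq]; simp
  rw [hp]
  by_cases h : (passLoop [] ls).length < 3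
  · simp [h]
  · simp only [h, if_false]
    exact pv_main (passLoop [] ls)
termination_by ls.length
decreasing_by
  have h1 := pvPairs_tail_len ls
  have h2 := passLoop_eq [] ls
  simp only [h2, List.nil_append] at *
  omega

-- ===== VERDICT (by name: the statement is the Claim_ definition above) =====
theorem findPossibilities_spec : Claim_equal_findPossibilities := by
  intro ls _
  exact pv_main ls
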